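-- pv_equiv track=rewrite | github.com/kintopp/rijksmuseum-mcp-plus | scripts/geocode_places.py | extract_qid
-- ===== SOURCE A (Python) =====
-- def extract_qid(uri: str) -> str | None:
--     """Extract QID from Wikidata URI."""
--     for prefix in ("http://www.wikidata.org/entity/",
--                     "https://www.wikidata.org/entity/",
--                     "http://www.wikidata.org/wiki/",
--                     "https://www.wikidata.org/wiki/"):
--         if uri.startswith(prefix):
--             return uri[len(prefix):]
--     return None
-- ===== SOURCE B (Python) =====
-- def extract_qid(uri: str) -> str | None:
--     """Extract QID from Wikidata URI by parsing it piecewise: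
--     scheme 'http' + optional 's', then the fixed host/path, then the
--     namespace segment ('entity/' or 'wiki/'); the remainder is the QID."""
--     if not uri.startswith("http"):
--         return None
--     rest = uri[4:]
--     if rest.startswith("s"):
--         rest = rest[1:]
--     if not rest.startswith("://www.wikidata.org/"):
--         return None
--     rest = rest[20:]
--     if rest.startswith("entity/"):
--         return rest[7:]
--     if rest.startswith("wiki/"):
--         return rest[5:]
--     return None
-- ===== Notes on version B (the rewrite author's own statement) =====
-- stated objective: idiomatic
-- what changed: B parses the URI piecewise (fixed scheme 'http' + optional 's', then the fixed host/path, then the 'entity/' or 'wiki/' segment) instead of A's loop testing four full prefix strings.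
import Mathlib
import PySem

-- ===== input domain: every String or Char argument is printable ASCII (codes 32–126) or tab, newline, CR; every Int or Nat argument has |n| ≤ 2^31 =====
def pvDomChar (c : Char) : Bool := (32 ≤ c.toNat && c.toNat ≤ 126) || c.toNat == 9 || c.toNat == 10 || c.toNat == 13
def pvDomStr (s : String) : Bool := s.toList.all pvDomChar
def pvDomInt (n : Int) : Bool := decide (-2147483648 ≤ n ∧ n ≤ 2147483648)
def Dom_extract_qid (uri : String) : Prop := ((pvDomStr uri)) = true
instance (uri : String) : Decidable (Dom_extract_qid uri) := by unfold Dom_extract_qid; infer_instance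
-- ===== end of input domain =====

-- B parses the URI piecewise (scheme + optional 's', fixed host, namespace segment)
-- instead of A's loop over four full prefixes; objective: alternative decomposition, same cost.

-- ===== PORT A =====
-- the for-loop over the 4-tuple of prefixes, as structural recursion over that list
def qidLoop (cs : List Char) : List (List Char) → Option (List Char)
  | [] => none
  | p :: ps =>
    if PySem.Chars.startswith cs p = true then
      some (PySem.List.slice cs (some (p.length : Int)) none)   -- uri[len(prefix):]
    else qidLoop cs ps

def extract_qid (uri : String) : Option String :=
  (qidLoop uri.toList
    ["http://www.wikidata.org/entity/".toList,
     "https://www.wikidata.org/entity/".toList,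
     "http://www.wikidata.org/wiki/".toList,
     "https://www.wikidata.org/wiki/".toList]).map String.ofList

-- ===== PORT B =====
def qidAltCore (cs : List Char) : Option (List Char) :=
  if PySem.Chars.startswith cs "http".toList = true then
    let r0 := PySem.List.slice cs (some 4) none                 -- uri[4:]
    let r1 := if PySem.Chars.startswith r0 "s".toList = true
              then PySem.List.slice r0 (some 1) none else r0    -- rest[1:]
    if PySem.Chars.startswith r1 "://www.wikidata.org/".toList = true then
      let r2 := PySem.List.slice r1 (some 20) none              -- rest[20:]
      if PySem.Chars.startswith r2 "entity/".toList = true then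
        some (PySem.List.slice r2 (some 7) none)                -- rest[7:]
      else if PySem.Chars.startswith r2 "wiki/".toList = true then
        some (PySem.List.slice r2 (some 5) none)                -- rest[5:]
      else none
    else none
  else none

def extract_qid_alt (uri : String) : Option String :=
  (qidAltCore uri.toList).map String.ofList

-- ===== PRECONDITION & SPEC =====
def Spec_extract_qid (uri : String) (out : Option String) : Prop := out = extract_qid_alt uri
instance (uri : String) (out : Option String) : Decidable (Spec_extract_qid uri out) := by unfold Spec_extract_qid; infer_instance

-- ===== CLAIM (what is proved, stated in full; the proofs are below) =====
def Claim_equal_extract_qid : Prop := ∀ (uri : String), Dom_extract_qid uri → Spec_extract_qid uri (extract_qid uri)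

-- ===== LEMMAS AND PROOFS =====

theorem qid_core_eq (cs : List Char) :
    qidLoop cs
      ["http://www.wikidata.org/entity/".toList,
       "https://www.wikidata.org/entity/".toList,
       "http://www.wikidata.org/wiki/".toList,
       "https://www.wikidata.org/wiki/".toList] = qidAltCore cs := by
  by_cases h1 : ['h','t','t','p'] <+: cs
  · obtain ⟨t, rfl⟩ := h1
    by_cases h2 : ['s'] <+: t
    · obtain ⟨u, rfl⟩ := h2
      by_cases h3 : [':','/','/','w','w','w','.','w','i','k','i','d','a','t','a','.','o','r','g','/'] <+: u
      · obtain ⟨v, rfl⟩ := h3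
        by_cases h4 : ['e','n','t','i','t','y','/'] <+: v
        · obtain ⟨w, rfl⟩ := h4
          simp [qidLoop, qidAltCore, PySem.Chars.startswith_iff, List.cons_prefix_cons,
                PySem.List.slice_from]
        · by_cases h5 : ['w','i','k','i','/'] <+: v
          · obtain ⟨w, rfl⟩ := h5
            simp [qidLoop, qidAltCore, PySem.Chars.startswith_iff, List.cons_prefix_cons,
                  PySem.List.slice_from]
          · simp [qidLoop, qidAltCore, PySem.Chars.startswith_iff, List.cons_prefix_cons,
                  PySem.List.slice_from, h4, h5]
      · have hE : ¬ ([':','/','/','w','w','w','.','w','i','k','i','d','a','t','a','.','o','r','g','/','e','n','t','i','t','y','/'] <+: u) :=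
          fun hc => h3 (List.IsPrefix.trans (by decide) hc)
        have hW : ¬ ([':','/','/','w','w','w','.','w','i','k','i','d','a','t','a','.','o','r','g','/','w','i','k','i','/'] <+: u) :=
          fun hc => h3 (List.IsPrefix.trans (by decide) hc)
        simp [qidLoop, qidAltCore, PySem.Chars.startswith_iff, List.cons_prefix_cons,
              PySem.List.slice_from, h3, hE, hW]
    · by_cases h3 : [':','/','/','w','w','w','.','w','i','k','i','d','a','t','a','.','o','r','g','/'] <+: t
      · obtain ⟨v, rfl⟩ := h3
        by_cases h4 : ['e','n','t','i','t','y','/'] <+: v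
        · obtain ⟨w, rfl⟩ := h4
          simp [qidLoop, qidAltCore, PySem.Chars.startswith_iff, List.cons_prefix_cons,
                PySem.List.slice_from]
        · by_cases h5 : ['w','i','k','i','/'] <+: v
          · obtain ⟨w, rfl⟩ := h5
            simp [qidLoop, qidAltCore, PySem.Chars.startswith_iff, List.cons_prefix_cons,
                  PySem.List.slice_from]
          · simp [qidLoop, qidAltCore, PySem.Chars.startswith_iff, List.cons_prefix_cons,
                  PySem.List.slice_from, h4, h5]
      · have hE : ¬ ([':','/','/','w','w','w','.','w','i','k','i','d','a','t','a','.','o','r','g','/','e','n','t','i','t','y','/'] <+: t) :=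
          fun hc => h3 (List.IsPrefix.trans (by decide) hc)
        have hW : ¬ ([':','/','/','w','w','w','.','w','i','k','i','d','a','t','a','.','o','r','g','/','w','i','k','i','/'] <+: t) :=
          fun hc => h3 (List.IsPrefix.trans (by decide) hc)
        have hSE : ¬ (['s',':','/','/','w','w','w','.','w','i','k','i','d','a','t','a','.','o','r','g','/','e','n','t','i','t','y','/'] <+: t) :=
          fun hc => h2 (List.IsPrefix.trans (by decide) hc)
        have hSW : ¬ (['s',':','/','/','w','w','w','.','w','i','k','i','d','a','t','a','.','o','r','g','/','w','i','k','i','/'] <+: t) :=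
          fun hc => h2 (List.IsPrefix.trans (by decide) hc)
        simp [qidLoop, qidAltCore, PySem.Chars.startswith_iff, List.cons_prefix_cons,
              PySem.List.slice_from, h2, h3, hE, hW, hSE, hSW]
  · have hA1 : ¬ (['h','t','t','p',':','/','/','w','w','w','.','w','i','k','i','d','a','t','a','.','o','r','g','/','e','n','t','i','t','y','/'] <+: cs) :=
      fun hc => h1 (List.IsPrefix.trans (by decide) hc)
    have hA2 : ¬ (['h','t','t','p','s',':','/','/','w','w','w','.','w','i','k','i','d','a','t','a','.','o','r','g','/','e','n','t','i','t','y','/'] <+: cs) :=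
      fun hc => h1 (List.IsPrefix.trans (by decide) hc)
    have hA3 : ¬ (['h','t','t','p',':','/','/','w','w','w','.','w','i','k','i','d','a','t','a','.','o','r','g','/','w','i','k','i','/'] <+: cs) :=
      fun hc => h1 (List.IsPrefix.trans (by decide) hc)
    have hA4 : ¬ (['h','t','t','p','s',':','/','/','w','w','w','.','w','i','k','i','d','a','t','a','.','o','r','g','/','w','i','k','i','/'] <+: cs) :=
      fun hc => h1 (List.IsPrefix.trans (by decide) hc)
    simp [qidLoop, qidAltCore, PySem.Chars.startswith_iff, h1, hA1, hA2, hA3, hA4]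

-- ===== VERDICT (by name: the statement is the Claim_ definition above) =====
theorem extract_qid_spec : Claim_equal_extract_qid := by
  intro uri _
  unfold Spec_extract_qid extract_qid extract_qid_alt
  rw [qid_core_eq]
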